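-- pv_equiv track=rewrite | github.com/Punith18-18/AI-ML-Research-Lab | generative-ai-storytelling/Prethi_AI-main/Prethi_AI-main/src/logic.py | deterministic_completion
-- ===== SOURCE A (Python) =====
-- from typing import List
--
-- def deterministic_completion(prompt: str, max_tokens: int = 32) -> str:
--     """Return a deterministic "completion" for the prompt.
--
--     Behavior / contract:
--     - Input: a prompt string and desired integer max_tokens (> 0).
--     - Output: a string representing up to `max_tokens` space-separated "tokens".
--     - The function is deterministic: same prompt -> same completion.
--
--     Implementation notes:
--     - We tokenize the prompt by whitespace and then generate additional tokens
--       by repeating words or appending indexed suffixes until we reach max_tokens.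
--     - Handles empty prompt and non-positive `max_tokens` defensively.
--
--     Args:
--         prompt: the input prompt text.
--         max_tokens: maximum number of tokens to produce (default 32).
--
--     Returns:
--         A completion string (may be empty if max_tokens <= 0).
--     """
--     if max_tokens <= 0:
--         return ""
--
--     words: List[str] = prompt.strip().split()
--     if not words:
--         # For empty prompt, return a deterministic sequence
--         return " ".join(f"token{i}" for i in range(1, max_tokens + 1))
--
--     tokens: List[str] = []
--     # Start by repeating existing words
--     i = 0
--     while len(tokens) < max_tokens:
--         word = words[i % len(words)]
--         # Append an index to make tokens unique after one cycle
--         tokens.append(f"{word}_{(i // len(words)) + 1}")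
--         i += 1
--
--     return " ".join(tokens)
-- ===== SOURCE B (Python) =====
-- def deterministic_completion(prompt: str, max_tokens: int = 32) -> str:
--     if max_tokens <= 0:
--         return ""
--     words = prompt.strip().split()
--     if not words:
--         return " ".join(f"token{i}" for i in range(1, max_tokens + 1))
--     # Build one string per repetition cycle: the suffix "_{c}" is carried by the
--     # join separator, so no per-token index arithmetic or token list is needed.
--     chunks = []
--     n = max_tokens
--     c = 1
--     while n > len(words):
--         chunks.append(f"_{c} ".join(words) + f"_{c}")
--         n -= len(words)
--         c += 1
--     chunks.append(f"_{c} ".join(words[:n]) + f"_{c}")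
--     return " ".join(chunks)
-- ===== Notes on version B (the rewrite author's own statement) =====
-- stated objective: alternative
-- what changed: Replaces the flat per-token while-loop (word via i%len, suffix via i//len, one formatted append per token) with a per-cycle construction: a loop over whole repetition cycles builds each cycle as a single string by joining the words with a separator that carries the cycle-number suffix, then one sliced partial cycle; B keeps no token list and does no per-token index arithmetic.
import Mathlib
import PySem

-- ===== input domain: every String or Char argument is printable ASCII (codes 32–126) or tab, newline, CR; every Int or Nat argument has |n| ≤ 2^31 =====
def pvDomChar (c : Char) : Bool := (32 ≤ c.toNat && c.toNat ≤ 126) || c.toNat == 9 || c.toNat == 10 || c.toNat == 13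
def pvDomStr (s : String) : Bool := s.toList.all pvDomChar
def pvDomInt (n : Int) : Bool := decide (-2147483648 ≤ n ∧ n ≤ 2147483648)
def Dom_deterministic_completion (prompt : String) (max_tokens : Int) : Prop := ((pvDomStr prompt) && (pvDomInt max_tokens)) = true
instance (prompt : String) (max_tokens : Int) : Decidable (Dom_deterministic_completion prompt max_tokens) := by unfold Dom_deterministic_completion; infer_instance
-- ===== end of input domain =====

-- B replaces A's flat per-token loop (word via i % len, suffix via i // len) by a per-cycle
-- construction: each repetition cycle becomes one string via a suffix-carrying join separator,
-- then the partial last cycle by slicing; stated as exact equivalence (objective: alternative).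

-- ===== PORT A =====
-- while len(tokens) < max_tokens: tokens.append(f"{words[i % len(words)]}_{i // len(words) + 1}"); i += 1
-- fuel = max_tokens.toNat iterations suffice: each pass appends exactly one token while the guard holds.
def detLoopA (ws : List String) (max_tokens : Int) : List String → Int → Nat → List String
  | tokens, _, 0 => tokens
  | tokens, i, fuel + 1 =>
    if (tokens.length : Int) < max_tokens then
      let word := PySem.List.pyGetD ws (PySem.Int.mod i (ws.length : Int)) ""
      detLoopA ws max_tokens
        (tokens ++ [word ++ "_" ++ PySem.Int.toStr (PySem.Int.floordiv i (ws.length : Int) + 1)])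
        (i + 1) fuel
    else tokens

def deterministic_completion (prompt : String) (max_tokens : Int) : String :=
  if max_tokens ≤ 0 then ""
  else
    let words := PySem.Str.split₀ (PySem.Str.strip prompt)
    if words = [] then
      PySem.Str.join " " ((PySem.List.pyRange 1 (max_tokens + 1) 1).map (fun i => "token" ++ PySem.Int.toStr i))
    else
      PySem.Str.join " " (detLoopA words max_tokens [] 0 max_tokens.toNat)

-- ===== PORT B =====
-- the while loop over whole cycles (n, c the loop state; words = w :: ws is nonempty at the call
-- site, kept split so the recursion on n visibly decreases by len(words) ≥ 1 each pass):
-- while n > len(words): chunks.append(f"_{c} ".join(words) + f"_{c}"); n -= len(words); c += 1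
-- then the partial final cycle: chunks.append(f"_{c} ".join(words[:n]) + f"_{c}")
def cyclesLoopB (w : String) (ws : List String) (n c : Int) : List String :=
  if ((ws.length + 1 : Nat) : Int) < n then
    (PySem.Str.join ("_" ++ PySem.Int.toStr c ++ " ") (w :: ws) ++ "_" ++ PySem.Int.toStr c)
      :: cyclesLoopB w ws (n - ((ws.length + 1 : Nat) : Int)) (c + 1)
  else
    [PySem.Str.join ("_" ++ PySem.Int.toStr c ++ " ") (PySem.List.slice (w :: ws) none (some n)) ++ "_" ++ PySem.Int.toStr c]
termination_by n.toNat
decreasing_by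
  rename_i h
  omega

def deterministic_completion_alt (prompt : String) (max_tokens : Int) : String :=
  if max_tokens ≤ 0 then ""
  else
    let words := PySem.Str.split₀ (PySem.Str.strip prompt)
    if words = [] then
      PySem.Str.join " " ((PySem.List.pyRange 1 (max_tokens + 1) 1).map (fun i => "token" ++ PySem.Int.toStr i))
    else
      match words with
      | [] => ""
      | w :: ws => PySem.Str.join " " (cyclesLoopB w ws max_tokens 1)

-- ===== PRECONDITION & SPEC =====
def Spec_deterministic_completion (prompt : String) (max_tokens : Int) (out : String) : Prop := out = deterministic_completion_alt prompt max_tokens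
instance (prompt : String) (max_tokens : Int) (out : String) : Decidable (Spec_deterministic_completion prompt max_tokens out) := by unfold Spec_deterministic_completion; infer_instance

-- ===== CLAIM (what is proved, stated in full; the proofs are below) =====
def Claim_equal_deterministic_completion : Prop := ∀ (prompt : String) (max_tokens : Int), Dom_deterministic_completion prompt max_tokens → Spec_deterministic_completion prompt max_tokens (deterministic_completion prompt max_tokens)

-- ===== LEMMAS AND PROOFS =====

-- the k-th token of the sequence, k counted from 0 (Nat form)
def pvTok (ws : List String) (k : Nat) : String :=
  PySem.List.pyGetD ws ((k % ws.length : Nat) : Int) "" ++ "_" ++ PySem.Int.toStr ((k / ws.length : Nat) + 1)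

lemma detLoopA_eq (ws : List String) (mt : Int) :
    ∀ (fuel : Nat) (t : List String) (i : Nat), (t.length : Int) + fuel = mt →
    detLoopA ws mt t (i : Int) fuel = t ++ (List.range fuel).map (fun j => pvTok ws (i + j)) := by
  intro fuel
  induction fuel with
  | zero => intro t i h; simp [detLoopA]
  | succ n ih =>
    intro t i h
    rw [detLoopA]
    have hlt : (t.length : Int) < mt := by omega
    rw [if_pos hlt]
    have hcast : ((i : Int) + 1) = ((i + 1 : Nat) : Int) := by push_cast; ring
    rw [hcast, ih _ (i + 1) (by simp; omega)]
    rw [List.range_succ_eq_map]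
    have hhead : PySem.List.pyGetD ws (PySem.Int.mod (i : Int) (ws.length : Int)) "" ++ "_"
        ++ PySem.Int.toStr (PySem.Int.floordiv (i : Int) (ws.length : Int) + 1) = pvTok ws (i + 0) := by
      unfold pvTok
      rw [PySem.Int.mod_natCast, PySem.Int.floordiv_natCast]
      simp
    have htail : (fun j => pvTok ws (i + 1 + j)) = (fun j => pvTok ws (i + j)) ∘ Nat.succ := by
      funext j
      simp only [Function.comp]
      congr 1
      omega
    simp only [List.map_cons, List.map_map, List.append_assoc, List.singleton_append, hhead, htail]

lemma range_cycle_map (ws : List String) (hws : ws ≠ []) (c r : Nat) (hr : r ≤ ws.length) :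
    (List.range r).map (fun j => pvTok ws (c * ws.length + j))
      = (ws.take r).map (fun w => w ++ "_" ++ PySem.Int.toStr ((c : Int) + 1)) := by
  have hL : 0 < ws.length := List.length_pos_iff.mpr hws
  apply List.ext_getElem
  · simp; omega
  · intro j h1 h2
    simp only [List.getElem_map, List.getElem_range, List.getElem_take]
    have hjr : j < r := by simpa using h1
    have hjL : j < ws.length := by omega
    unfold pvTok
    have hmod : (c * ws.length + j) % ws.length = j := by
      rw [Nat.mul_comm, Nat.mul_add_mod]; exact Nat.mod_eq_of_lt hjL
    have hdiv : (c * ws.length + j) / ws.length = c := by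
      rw [Nat.mul_comm, Nat.mul_add_div hL, Nat.div_eq_of_lt hjL]; omega
    rw [hmod, hdiv]
    congr 1
    congr 1
    rw [PySem.List.pyGetD_natCast]
    exact List.getD_eq_getElem ws "" hjL

-- '"_c " separator + trailing "_c"' equals 'space separator between suffixed words' (chars level)
lemma join_suffix (t : List Char) :
    ∀ (l : List (List Char)), l ≠ [] →
    PySem.Chars.join (t ++ [' ']) l ++ t = PySem.Chars.join [' '] (l.map (fun x => x ++ t)) := by
  intro l
  induction l with
  | nil => intro h; exact absurd rfl h
  | cons a l ih =>
    intro _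
    cases l with
    | nil => simp [PySem.Chars.join, List.intercalate]
    | cons b l =>
      have ih' := ih (by simp)
      simp only [PySem.Chars.join, List.intercalate, List.map_cons, List.intersperse,
        List.flatten_cons] at *
      simp only [List.append_assoc]
      rw [ih']

-- space-join distributes over append of nonempty lists (chars level)
lemma join_append (a b : List (List Char)) (ha : a ≠ []) (hb : b ≠ []) :
    PySem.Chars.join [' '] (a ++ b)
      = PySem.Chars.join [' '] a ++ ' ' :: PySem.Chars.join [' '] b := by
  induction a with
  | nil => exact absurd rfl ha
  | cons x a ih =>
    cases a with
    | nil =>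
      cases b with
      | nil => exact absurd rfl hb
      | cons y b => simp [PySem.Chars.join, List.intercalate]
    | cons z a =>
      have ih' := ih (by simp)
      simp only [PySem.Chars.join, List.intercalate, List.cons_append, List.intersperse,
        List.flatten_cons] at *
      rw [ih']
      simp [List.append_assoc]

lemma cyclesLoopB_ne_nil (w : String) (ws : List String) (n c : Int) :
    cyclesLoopB w ws n c ≠ [] := by
  rw [cyclesLoopB]
  split <;> simp

-- chunk for cycle number c+1 over a word list: its chars are the space-join of the suffixed words
lemma chunk_toList (l : List String) (hl : l ≠ []) (c : Nat) :
    (PySem.Str.join ("_" ++ PySem.Int.toStr ((c : Int) + 1) ++ " ") l ++ "_"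
        ++ PySem.Int.toStr ((c : Int) + 1)).toList
      = PySem.Chars.join [' ']
          ((l.map (fun w => w ++ "_" ++ PySem.Int.toStr ((c : Int) + 1))).map String.toList) := by
  have h := join_suffix ('_' :: (PySem.Int.toStr ((c : Int) + 1)).toList) (l.map String.toList)
    (by simpa using hl)
  simp only [String.toList_append, PySem.Str.toList_join]
  have h1 : ("_").toList = ['_'] := rfl
  have h2 : (" ").toList = [' '] := rfl
  simp only [h1, h2] at *
  simp only [List.singleton_append, List.append_assoc] at *
  rw [h]
  congr 1
  simp [List.map_map, Function.comp, String.toList_append, List.append_assoc]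

lemma cyclesLoopB_join (w : String) (ws : List String) :
    ∀ N : Nat, 0 < N → ∀ c : Nat,
    (PySem.Str.join " " (cyclesLoopB w ws (N : Int) ((c : Int) + 1))).toList
      = PySem.Chars.join [' ']
          (((List.range N).map (fun j => pvTok (w :: ws) (c * (w :: ws).length + j))).map String.toList) := by
  intro N
  induction N using Nat.strong_induction_on with
  | _ N ih =>
    intro hN c
    have hL : (w :: ws).length = ws.length + 1 := by simp
    rw [cyclesLoopB]
    by_cases hg : ((ws.length + 1 : Nat) : Int) < (N : Int)
    · rw [if_pos hg]
      have hgn : ws.length + 1 < N := by exact_mod_cast hg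
      -- cast the recursive argument to Nat form
      have hsub : (N : Int) - ((ws.length + 1 : Nat) : Int) = ((N - (ws.length + 1) : Nat) : Int) := by
        push_cast; omega
      have hc2 : ((c : Int) + 1) + 1 = (((c + 1 : Nat) : Int)) + 1 := by push_cast; ring
      rw [hsub, hc2]
      have ih' := ih (N - (ws.length + 1)) (by omega) (by omega) (c + 1)
      -- join " " (chunk :: rest) at chars level
      have hrest := cyclesLoopB_ne_nil w ws ((N - (ws.length + 1) : Nat) : Int) (((c + 1 : Nat) : Int) + 1)
      rw [PySem.Str.toList_join]
      rw [show (" " : String).toList = [' '] from rfl]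
      have hcons : ∀ (x : String) (xs : List String), xs ≠ [] →
          PySem.Chars.join [' '] ((x :: xs).map String.toList)
            = x.toList ++ ' ' :: PySem.Chars.join [' '] (xs.map String.toList) := by
        intro x xs hxs
        cases xs with
        | nil => exact absurd rfl hxs
        | cons y ys => simp [PySem.Chars.join, List.intercalate]
      rw [hcons _ _ hrest]
      -- rest by IH
      have ihres : PySem.Chars.join [' '] ((cyclesLoopB w ws ((N - (ws.length + 1) : Nat) : Int) (((c + 1 : Nat) : Int) + 1)).map String.toList)
          = PySem.Chars.join [' ']
              (((List.range (N - (ws.length + 1))).map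
                (fun j => pvTok (w :: ws) ((c + 1) * (w :: ws).length + j))).map String.toList) := by
        have := ih'
        rw [PySem.Str.toList_join, show (" " : String).toList = [' '] from rfl] at this
        exact this
      rw [ihres]
      -- chunk: the full cycle
      have hfull : (PySem.Str.join ("_" ++ PySem.Int.toStr ((c : Int) + 1) ++ " ") (w :: ws) ++ "_"
            ++ PySem.Int.toStr ((c : Int) + 1)).toList
          = PySem.Chars.join [' ']
              (((List.range (w :: ws).length).map (fun j => pvTok (w :: ws) (c * (w :: ws).length + j))).map String.toList) := by
        rw [chunk_toList _ (by simp)]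
        congr 2
        rw [range_cycle_map (w :: ws) (by simp) c (w :: ws).length le_rfl]
        simp
      rw [hfull]
      -- split the RHS range
      have hsplitN : N = (w :: ws).length + (N - (ws.length + 1)) := by simp [hL]; omega
      conv_rhs => rw [hsplitN, List.range_add, List.map_append, List.map_append]
      rw [join_append _ _ (by simp [hL]) (by simp; omega)]
      simp only [List.map_map]
      congr 2
      apply congrArg
      apply List.map_congr_left
      intro j _
      simp only [Function.comp]
      have harg : (c + 1) * (w :: ws).length + j
          = c * (w :: ws).length + ((w :: ws).length + j) := by ring
      rw [harg]
    · rw [if_neg hg]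
      have hle : N ≤ ws.length + 1 := by omega
      -- single chunk: the partial cycle words[:N]
      rw [PySem.Str.toList_join, show (" " : String).toList = [' '] from rfl]
      have hslice : PySem.List.slice (w :: ws) none (some (N : Int)) = (w :: ws).take N := by
        rw [PySem.List.slice_to_natCast]
      rw [hslice]
      simp only [List.map_cons, List.map_nil]
      have hone : ∀ x : List Char, PySem.Chars.join [' '] [x] = x := by
        intro x; simp [PySem.Chars.join, List.intercalate, List.intersperse]
      rw [hone, chunk_toList _ (by simp [List.take_eq_nil_iff]; omega)]
      congr 2
      rw [range_cycle_map (w :: ws) (by simp) c N (by simp [hL]; omega)]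

lemma str_eq_of_toList (s t : String) (h : s.toList = t.toList) : s = t := by
  have := congrArg String.ofList h
  simpa using this

-- ===== VERDICT (by name: the statement is the Claim_ definition above) =====
theorem deterministic_completion_spec : Claim_equal_deterministic_completion := by
  intro prompt mt hdom
  unfold Spec_deterministic_completion deterministic_completion deterministic_completion_alt
  by_cases h0 : mt ≤ 0
  · simp [h0]
  · rw [if_neg h0, if_neg h0]
    set words := PySem.Str.split₀ (PySem.Str.strip prompt) with hwords
    by_cases he : words = []
    · simp [he]
    · rw [if_neg he, if_neg he]
      cases hw : words with
      | nil => exact absurd hw he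
      | cons w ws =>
        have hmtN : mt = (mt.toNat : Int) := by omega
        have hA := detLoopA_eq (w :: ws) mt mt.toNat [] 0 (by simp; omega)
        simp only [List.nil_append, Nat.zero_add, Nat.cast_zero] at hA
        show PySem.Str.join " " (detLoopA (w :: ws) mt [] 0 mt.toNat)
          = PySem.Str.join " " (cyclesLoopB w ws mt 1)
        rw [hA]
        have hNpos : 0 < mt.toNat := by omega
        have h1 : (1 : Int) = ((0 : Nat) : Int) + 1 := by norm_num
        apply str_eq_of_toList
        conv_rhs => rw [hmtN, h1]
        rw [cyclesLoopB_join w ws mt.toNat hNpos 0]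
        rw [PySem.Str.toList_join]
        have h2 : (" ").toList = [' '] := rfl
        rw [h2]
        simp
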